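-- pv_equiv track=rewrite | github.com/AMS347/PRACTICA | Tendencias.py | CuentaEtiquetas
-- ===== SOURCE A (Python) =====
-- listafechas=["08-22-2016","08-27-2016"]
--
-- def CuentaEtiquetas(tendencias,listasfechas):
--     diccionario={}
--     for i in tendencias:
--         temp=tendencias.get(i)
--         for k in listafechas:
--             if k==i:
--                 for j in temp:
--                     if j not in diccionario:
--                         diccionario[j]=0
--                     if j in diccionario:
--                         diccionario[j] = diccionario.get(j)+1
--     return (diccionario)
-- ===== SOURCE B (Python) =====
-- listafechas=["08-22-2016","08-27-2016"]
--
-- def CuentaEtiquetas(tendencias, listasfechas):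
--     # Iterate the two fixed dates and look each up, instead of scanning every key (simpler).
--     # (listasfechas is ignored, exactly as in the original.)
--     conteo = {}
--     for fecha in listafechas:
--         if fecha in tendencias:
--             for etiqueta in tendencias[fecha]:
--                 conteo[etiqueta] = conteo.get(etiqueta, 0) + 1
--     return conteo
-- ===== Notes on version B (the rewrite author's own statement) =====
-- stated objective: simpler
-- what changed: Instead of scanning every key of tendencias and testing each against the fixed date list, B iterates the two fixed dates of the global listafechas, looks each up in tendencias, and tallies the matching tag lists with dict.get(tag,0)+1 instead of A's two-step insert-then-increment.
import Mathlib
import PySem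

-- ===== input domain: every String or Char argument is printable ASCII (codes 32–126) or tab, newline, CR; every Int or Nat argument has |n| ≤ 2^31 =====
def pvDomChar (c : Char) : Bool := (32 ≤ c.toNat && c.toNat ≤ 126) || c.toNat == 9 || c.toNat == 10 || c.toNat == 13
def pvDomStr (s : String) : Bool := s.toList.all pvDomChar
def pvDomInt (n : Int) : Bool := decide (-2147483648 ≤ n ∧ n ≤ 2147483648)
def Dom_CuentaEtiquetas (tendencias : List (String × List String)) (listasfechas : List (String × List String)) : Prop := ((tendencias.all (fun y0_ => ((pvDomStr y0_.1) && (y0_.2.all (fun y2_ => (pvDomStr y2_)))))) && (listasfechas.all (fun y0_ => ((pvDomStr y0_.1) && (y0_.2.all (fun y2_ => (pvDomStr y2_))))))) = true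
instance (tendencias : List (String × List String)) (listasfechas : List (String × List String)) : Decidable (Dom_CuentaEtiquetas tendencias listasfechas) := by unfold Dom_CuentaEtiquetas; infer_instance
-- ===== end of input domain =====

-- B iterates the two fixed dates and looks each up in the dict, instead of
-- scanning every key of tendencias against the fixed date list (simpler).
-- Both programs ignore the listasfechas parameter, like the original.

-- ===== PORT A =====
-- the module-level constant both Pythons reference
def listafechasPV : List String := ["08-22-2016", "08-27-2016"]

def CuentaEtiquetas (tendencias : List (String × List String)) (listasfechas : List (String × List String)) : List (String × Int) :=
  -- `for i in tendencias` iterates the dict's keys; `tendencias.get(i)` is a lookup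
  -- (always a hit, so `.getD []` is exact here).
  let diccionario : PySem.Dict String Int :=
    (tendencias.map (fun p => p.1)).foldl (fun diccionario i =>
      let temp := ((PySem.Dict.mk tendencias).get? i).getD []
      listafechasPV.foldl (fun diccionario k =>
        if k = i then
          temp.foldl (fun diccionario j =>
            let d1 := if diccionario.contains j = false then diccionario.insert j 0 else diccionario
            if d1.contains j then d1.insert j (d1.getD j 0 + 1) else d1) diccionario
        else diccionario) diccionario) PySem.Dict.empty
  diccionario.items

-- ===== PORT B =====
def CuentaEtiquetas_alt (tendencias : List (String × List String)) (listasfechas : List (String × List String)) : List (String × Int) :=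
  let conteo : PySem.Dict String Int :=
    listafechasPV.foldl (fun conteo fecha =>
      if (PySem.Dict.mk tendencias).contains fecha then
        (((PySem.Dict.mk tendencias).get? fecha).getD []).foldl
          (fun conteo etiqueta => conteo.insert etiqueta (conteo.getD etiqueta 0 + 1)) conteo
      else conteo) PySem.Dict.empty
  conteo.items

-- ===== PRECONDITION & SPEC =====
-- Pre_ excludes association lists whose keys repeat (no Python dict has duplicate
-- keys) and dicts that list "08-27-2016" before "08-22-2016", where the key order
-- of the returned dict is an accidental artefact of A's iteration order (A emits
-- the tags of "08-27-2016" first, B those of "08-22-2016").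
def Pre_CuentaEtiquetas (tendencias : List (String × List String)) (listasfechas : List (String × List String)) : Prop :=
  (tendencias.map (fun p => p.1)).Nodup ∧
  ("08-22-2016" ∈ tendencias.map (fun p => p.1) →
    "08-27-2016" ∉ (tendencias.map (fun p => p.1)).takeWhile (fun s => s ≠ "08-22-2016"))
instance (tendencias : List (String × List String)) (listasfechas : List (String × List String)) : Decidable (Pre_CuentaEtiquetas tendencias listasfechas) := by unfold Pre_CuentaEtiquetas; infer_instance

def pvWitness_CuentaEtiquetas : (List (String × List String)) × (List (String × List String)) :=
  ([("08-22-2016", ["tag", "other"]), ("08-27-2016", ["tag"])], [])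

def Spec_CuentaEtiquetas (tendencias : List (String × List String)) (listasfechas : List (String × List String)) (out : List (String × Int)) : Prop := out = CuentaEtiquetas_alt tendencias listasfechas
instance (tendencias : List (String × List String)) (listasfechas : List (String × List String)) (out : List (String × Int)) : Decidable (Spec_CuentaEtiquetas tendencias listasfechas out) := by unfold Spec_CuentaEtiquetas; infer_instance

-- ===== CLAIM (what is proved, stated in full; the proofs are below) =====
def Claim_equal_CuentaEtiquetas : Prop := ∀ (tendencias : List (String × List String)) (listasfechas : List (String × List String)), Dom_CuentaEtiquetas tendencias listasfechas → Pre_CuentaEtiquetas tendencias listasfechas → Spec_CuentaEtiquetas tendencias listasfechas (CuentaEtiquetas tendencias listasfechas)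

-- ===== LEMMAS AND PROOFS =====

-- one tag-counting pass (the loop body both programs share per matched date)
def tallyPV (c : PySem.Dict String Int) (xs : List String) : PySem.Dict String Int :=
  xs.foldl (fun c j => c.insert j (c.getD j 0 + 1)) c

-- A's two-step update (insert 0 if absent, then insert get+1) is one counting insert
lemma stepA_eq (c : PySem.Dict String Int) (j : String) :
    (let d1 := if c.contains j = false then c.insert j 0 else c
     if d1.contains j then d1.insert j (d1.getD j 0 + 1) else d1)
    = c.insert j (c.getD j 0 + 1) := by
  by_cases h : c.contains j = true
  · simp [h]
  · simp only [Bool.not_eq_true] at h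
    rw [PySem.Dict.getD_of_not_contains c 0 h]
    simp [h, PySem.Dict.contains_insert_self, PySem.Dict.getD_insert_self,
      PySem.Dict.insert_insert_self]

-- A's inner date loop, unfolded on the two-element constant
lemma innerA_eq (c : PySem.Dict String Int) (i : String) (temp : List String) :
    listafechasPV.foldl (fun diccionario k =>
        if k = i then
          temp.foldl (fun diccionario j =>
            let d1 := if diccionario.contains j = false then diccionario.insert j 0 else diccionario
            if d1.contains j then d1.insert j (d1.getD j 0 + 1) else d1) diccionario
        else diccionario) c
    = if i = "08-22-2016" ∨ i = "08-27-2016" then tallyPV c temp else c := by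
  have ht : ∀ (c : PySem.Dict String Int),
      temp.foldl (fun diccionario j =>
        let d1 := if diccionario.contains j = false then diccionario.insert j 0 else diccionario
        if d1.contains j then d1.insert j (d1.getD j 0 + 1) else d1) c = tallyPV c temp := by
    intro c
    exact PySem.List.foldl_congr_mem temp _ _ c (fun a x _ => stepA_eq a x)
  simp only [listafechasPV, List.foldl_cons, List.foldl_nil, ht]
  by_cases h1 : "08-22-2016" = i
  · subst h1
    simp
  · by_cases h2 : "08-27-2016" = i
    · subst h2
      simp
    · have e1 : ¬ (i = "08-22-2016") := fun h => h1 h.symm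
      have e2 : ¬ (i = "08-27-2016") := fun h => h2 h.symm
      simp [h1, h2, e1, e2]

-- the matched-date key list both reductions land on
def matchedPV (ks : List String) : List String :=
  ks.filter (fun i => i = "08-22-2016" ∨ i = "08-27-2016")

lemma A_eq (tendencias listasfechas : List (String × List String)) :
    CuentaEtiquetas tendencias listasfechas =
      ((matchedPV (tendencias.map (fun p => p.1))).foldl
        (fun c i => tallyPV c (((PySem.Dict.mk tendencias).get? i).getD []))
        PySem.Dict.empty).items := by
  unfold CuentaEtiquetas matchedPV
  rw [List.foldl_filter]
  refine congrArg PySem.Dict.items ?_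
  refine PySem.List.foldl_congr_mem _ _ _ _ (fun c i _ => ?_)
  rw [innerA_eq]
  simp

lemma B_eq (tendencias listasfechas : List (String × List String)) :
    CuentaEtiquetas_alt tendencias listasfechas =
      (((if "08-22-2016" ∈ tendencias.map (fun p => p.1) then ["08-22-2016"] else []) ++
        (if "08-27-2016" ∈ tendencias.map (fun p => p.1) then ["08-27-2016"] else [])).foldl
        (fun c i => tallyPV c (((PySem.Dict.mk tendencias).get? i).getD []))
        PySem.Dict.empty).items := by
  unfold CuentaEtiquetas_alt
  have hk : ∀ s : String, (PySem.Dict.mk tendencias).contains s = decide (s ∈ tendencias.map (fun p => p.1)) := by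
    intro s
    rw [PySem.Dict.contains_eq_decide_mem_keys]
    rfl
  simp only [listafechasPV, List.foldl_cons, List.foldl_nil, hk]
  by_cases h1 : "08-22-2016" ∈ tendencias.map (fun p => p.1) <;>
    by_cases h2 : "08-27-2016" ∈ tendencias.map (fun p => p.1) <;>
      simp [h1, h2, tallyPV]

lemma matched_none (ks : List String) (h1 : "08-22-2016" ∉ ks) (h2 : "08-27-2016" ∉ ks) :
    matchedPV ks = [] := by
  unfold matchedPV
  rw [List.filter_eq_nil_iff]
  intro a ha
  simp only [decide_eq_true_eq]
  rintro (rfl | rfl)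
  · exact h1 ha
  · exact h2 ha

lemma matched_single (ks : List String) (hnd : ks.Nodup) (h1 : "08-22-2016" ∉ ks) :
    matchedPV ks = if "08-27-2016" ∈ ks then ["08-27-2016"] else [] := by
  induction ks with
  | nil => simp [matchedPV]
  | cons a ks ih =>
    have hnot : a ∉ ks := (List.nodup_cons.mp hnd).1
    have ha1 : ¬ (a = "08-22-2016") := fun h => h1 (h ▸ List.mem_cons_self)
    have h1' : "08-22-2016" ∉ ks := fun h => h1 (List.mem_cons_of_mem _ h)
    by_cases ha2 : a = "08-27-2016"
    · have hstep : matchedPV (a :: ks) = a :: matchedPV ks := by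
        simp [matchedPV, ha2]
      have hnot2 : "08-27-2016" ∉ ks := ha2 ▸ hnot
      rw [hstep, matched_none ks h1' hnot2, ha2]
      simp
    · have hstep : matchedPV (a :: ks) = matchedPV ks := by
        simp [matchedPV, ha1, ha2]
      have e2 : ¬ ("08-27-2016" = a) := fun h => ha2 h.symm
      rw [hstep, ih (List.nodup_cons.mp hnd).2 h1']
      by_cases h2 : "08-27-2016" ∈ ks <;> simp [h2, e2]

-- under Pre_, A's matched keys come out in exactly B's fixed order
lemma matched_eq (ks : List String) (hnd : ks.Nodup)
    (hord : "08-22-2016" ∈ ks → "08-27-2016" ∉ ks.takeWhile (fun s => s ≠ "08-22-2016")) :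
    matchedPV ks =
      (if "08-22-2016" ∈ ks then ["08-22-2016"] else []) ++
      (if "08-27-2016" ∈ ks then ["08-27-2016"] else []) := by
  induction ks with
  | nil => simp [matchedPV]
  | cons a ks ih =>
    have hnot : a ∉ ks := (List.nodup_cons.mp hnd).1
    have hnd' : ks.Nodup := (List.nodup_cons.mp hnd).2
    by_cases ha1 : a = "08-22-2016"
    · have hstep : matchedPV (a :: ks) = a :: matchedPV ks := by
        simp [matchedPV, ha1]
      have hnot1 : "08-22-2016" ∉ ks := ha1 ▸ hnot
      rw [hstep, matched_single ks hnd' hnot1, ha1]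
      have e2 : ("08-27-2016" : String) ≠ "08-22-2016" := by decide
      by_cases h2 : "08-27-2016" ∈ ks <;> simp [h2, e2]
    · by_cases ha2 : a = "08-27-2016"
      · have hd1 : "08-22-2016" ∉ ks := by
          intro hmem
          have htw := hord (List.mem_cons_of_mem _ hmem)
          apply htw
          have hcons : (a :: ks).takeWhile (fun s => s ≠ "08-22-2016") =
              a :: ks.takeWhile (fun s => s ≠ "08-22-2016") := by
            rw [List.takeWhile_cons_of_pos]
            simp [ha2]
          rw [hcons, ← ha2]
          exact List.mem_cons_self
        have hnot2 : "08-27-2016" ∉ ks := ha2 ▸ hnot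
        have hstep : matchedPV (a :: ks) = a :: matchedPV ks := by
          simp [matchedPV, ha2]
        rw [hstep, matched_none ks hd1 hnot2, ha2]
        have e1 : ("08-22-2016" : String) ≠ "08-27-2016" := by decide
        simp [hd1, e1]
      · have hstep : matchedPV (a :: ks) = matchedPV ks := by
          simp [matchedPV, ha1, ha2]
        have hord' : "08-22-2016" ∈ ks → "08-27-2016" ∉ ks.takeWhile (fun s => s ≠ "08-22-2016") := by
          intro hmem hc
          apply hord (List.mem_cons_of_mem _ hmem)
          have hcons : (a :: ks).takeWhile (fun s => s ≠ "08-22-2016") =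
              a :: ks.takeWhile (fun s => s ≠ "08-22-2016") := by
            rw [List.takeWhile_cons_of_pos]
            simp [ha1]
          rw [hcons]
          exact List.mem_cons_of_mem _ hc
        have e1 : ¬ ("08-22-2016" = a) := fun h => ha1 h.symm
        have e2 : ¬ ("08-27-2016" = a) := fun h => ha2 h.symm
        rw [hstep, ih hnd' hord']
        simp [e1, e2]

-- ===== VERDICT (by name: the statement is the Claim_ definition above) =====
theorem CuentaEtiquetas_spec : Claim_equal_CuentaEtiquetas := by
  intro tendencias listasfechas _ hpre
  unfold Spec_CuentaEtiquetas
  rw [A_eq, B_eq, matched_eq _ hpre.1 hpre.2]
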